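-- pv_equiv track=rewrite | github.com/kinghyeongu/LEARN_PYTHON | 20_해상도입력화면비율구하기.py | solution
-- ===== SOURCE A (Python) =====
-- def solution(a, b):
--     markA=a
--     markB=b
--     if(b>a) : a,b = b,a
--
--     while(b!=0):
--         a=a%b
--         a,b=b,a
--     return str(markA//a) + ":" + str(markB//a)
-- ===== SOURCE B (Python) =====
-- def solution(a, b):
--     # recursive Euclid on the pair ordered larger-first
--     def g(x, y):
--         return x if y == 0 else g(y, x % y)
--     d = g(max(a, b), min(a, b))
--     return f"{a // d}:{b // d}"
-- ===== Notes on version B (the rewrite author's own statement) =====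
-- stated objective: simpler
-- what changed: Replaces the mark variables, in-place swap and destructive while loop by a three-line recursive Euclid helper on the pair ordered with max/min, and an f-string; Pre_ excludes only (0, 0), where both programs raise ZeroDivisionError.
-- outside the precondition, e.g. on solution(0, 0): A raises ZeroDivisionError, B raises ZeroDivisionError
import Mathlib
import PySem

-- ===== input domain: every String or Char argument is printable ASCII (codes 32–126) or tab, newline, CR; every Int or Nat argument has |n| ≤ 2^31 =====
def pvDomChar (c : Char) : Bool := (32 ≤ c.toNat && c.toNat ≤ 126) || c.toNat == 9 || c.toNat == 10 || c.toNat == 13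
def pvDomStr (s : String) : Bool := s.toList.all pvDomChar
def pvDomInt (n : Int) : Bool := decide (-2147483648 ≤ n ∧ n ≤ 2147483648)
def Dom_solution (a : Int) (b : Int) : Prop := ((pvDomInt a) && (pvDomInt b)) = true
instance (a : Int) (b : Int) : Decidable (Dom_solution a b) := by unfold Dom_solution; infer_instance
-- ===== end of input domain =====

-- B: three-line recursive Euclid on the pair ordered with max/min instead of
-- A's mark variables, in-place swap and destructive while loop (objective: simpler).

-- ===== PORT A =====
-- the while loop: a = a % b; a, b = b, a  until b == 0
def solutionLoop (a : Int) (b : Int) : Int :=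
  if h : b = 0 then a
  else solutionLoop b (PySem.Int.mod a b)
termination_by b.natAbs
decreasing_by
  rcases lt_or_gt_of_ne h with hb | hb
  · have := PySem.Int.mod_neg_bounds a hb; omega
  · have h1 := PySem.Int.mod_nonneg a hb
    have h2 := PySem.Int.mod_lt a hb
    omega

def solution (a : Int) (b : Int) : String :=
  let markA := a
  let markB := b
  let p := if b > a then (b, a) else (a, b)
  let g := solutionLoop p.1 p.2
  PySem.Int.toStr (PySem.Int.floordiv markA g) ++ ":" ++ PySem.Int.toStr (PySem.Int.floordiv markB g)

-- ===== PORT B =====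
-- def g(x, y): return x if y == 0 else g(y, x % y)
def gRec (x : Int) (y : Int) : Int :=
  if h : y = 0 then x
  else gRec y (PySem.Int.mod x y)
termination_by y.natAbs
decreasing_by
  rcases lt_or_gt_of_ne h with hy | hy
  · have := PySem.Int.mod_neg_bounds x hy; omega
  · have h1 := PySem.Int.mod_nonneg x hy
    have h2 := PySem.Int.mod_lt x hy
    omega

def solution_alt (a : Int) (b : Int) : String :=
  let d := gRec (max a b) (min a b)
  PySem.Int.toStr (PySem.Int.floordiv a d) ++ ":" ++ PySem.Int.toStr (PySem.Int.floordiv b d)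

-- ===== PRECONDITION & SPEC =====
-- A raises ZeroDivisionError exactly when a = 0 and b = 0 (so does B).
def Pre_solution (a : Int) (b : Int) : Prop := ¬ (a = 0 ∧ b = 0)
instance (a : Int) (b : Int) : Decidable (Pre_solution a b) := by unfold Pre_solution; infer_instance
def pvWitness_solution : Int × Int := (1920, 1080)

def Spec_solution (a : Int) (b : Int) (out : String) : Prop := out = solution_alt a b
instance (a : Int) (b : Int) (out : String) : Decidable (Spec_solution a b out) := by unfold Spec_solution; infer_instance

-- ===== CLAIM =====
def Claim_equal_solution : Prop := ∀ (a : Int) (b : Int), Dom_solution a b → Pre_solution a b → Spec_solution a b (solution a b)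

-- ===== LEMMAS AND PROOFS =====

-- A's while loop and B's recursion follow the same recurrence
theorem loop_eq_gRec (a b : Int) : solutionLoop a b = gRec a b := by
  rw [solutionLoop, gRec]
  split
  · rfl
  · exact loop_eq_gRec b _
termination_by b.natAbs
decreasing_by
  rename_i h
  rcases lt_or_gt_of_ne h with hb | hb
  · have := PySem.Int.mod_neg_bounds a hb; omega
  · have h1 := PySem.Int.mod_nonneg a hb
    have h2 := PySem.Int.mod_lt a hb
    omega

-- ===== VERDICT =====
theorem solution_spec : Claim_equal_solution := by
  intro a b _ _
  unfold Spec_solution solution solution_alt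
  by_cases hab : b > a
  · simp only [if_pos hab, loop_eq_gRec, max_eq_right (le_of_lt hab), min_eq_left (le_of_lt hab)]
  · simp only [if_neg hab, loop_eq_gRec, max_eq_left (le_of_not_gt hab), min_eq_right (le_of_not_gt hab)]
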